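-- pv_equiv track=rewrite | github.com/andreibratu/bachelor | sem5/avdp/lab/helper/bits.py | substract_one_binary
-- ===== SOURCE A (Python) =====
-- from typing import List
--
-- def substract_one_binary(binary: List[int]) -> List[int]:
--     carry = 1
--     answer = binary[::-1]
--     for idx, _ in enumerate(answer):
--         answer[idx] -= carry
--         carry = 0
--         if answer[idx] == -1:
--             answer[idx] = 1
--             carry = 1
--     if carry == 1:
--         answer = answer[:-1]
--     return answer[::-1]
-- ===== SOURCE B (Python) =====
-- from typing import List
--
-- def substract_one_binary(binary: List[int]) -> List[int]:
--     # pass 1: the borrow arriving at each position, computed right-to-left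
--     cins = []
--     c = 1
--     for x in reversed(binary):
--         cins.append(c)
--         c = 1 if x == c - 1 else 0
--     cins.reverse()
--     # pass 2: stateless rewrite of each digit from its incoming borrow
--     result = [1 if x == cin - 1 else x - cin for x, cin in zip(binary, cins)]
--     return result[1:] if c else result
-- ===== Notes on version B (the rewrite author's own statement) =====
-- stated objective: alternative
-- what changed: Replaces A's reverse-copy with in-place index mutation and post-hoc truncate-then-reverse by two passes with no reversal of the answer: a right-to-left pass that only precomputes the incoming borrow of each position, a stateless comprehension rewriting each digit from its borrow, and a head drop on underflow.
import Mathlib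
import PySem

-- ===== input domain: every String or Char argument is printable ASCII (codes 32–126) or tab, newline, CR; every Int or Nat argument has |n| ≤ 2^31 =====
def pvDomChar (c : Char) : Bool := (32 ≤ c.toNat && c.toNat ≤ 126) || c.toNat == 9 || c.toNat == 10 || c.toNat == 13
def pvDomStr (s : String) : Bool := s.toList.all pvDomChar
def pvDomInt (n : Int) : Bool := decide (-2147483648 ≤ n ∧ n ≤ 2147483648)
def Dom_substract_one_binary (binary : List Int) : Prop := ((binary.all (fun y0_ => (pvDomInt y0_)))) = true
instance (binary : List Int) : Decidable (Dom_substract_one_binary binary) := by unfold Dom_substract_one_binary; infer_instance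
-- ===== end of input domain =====

-- B computes the same subtraction by two passes (precompute each position's
-- incoming borrow right-to-left, then a stateless per-digit rewrite, then a head
-- drop on underflow) instead of A's reverse-copy / in-place mutation / truncate-
-- then-reverse loop; equivalence is proved on all inputs ('alternative', no speed claim).


-- ===== PORT A =====
-- the loop body: answer[idx] -= carry; carry = 0; if answer[idx] == -1: answer[idx] = 1; carry = 1
def pvAStep (st : List Int × Int) (x : Int) : List Int × Int :=
  let v := x - st.2
  if v = -1 then (st.1 ++ [1], 1) else (st.1 ++ [v], 0)

def substract_one_binary (binary : List Int) : List Int :=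
  let answer := (PySem.List.slice? binary none none (-1)).getD []   -- binary[::-1]
  let st := answer.foldl pvAStep ([], 1)
  let answer := if st.2 = 1 then PySem.List.slice st.1 none (some (-1)) else st.1  -- answer[:-1]
  (PySem.List.slice? answer none none (-1)).getD []   -- answer[::-1]

-- ===== PORT B =====
-- pass-1 body: cins.append(c); c = 1 if x == c - 1 else 0
def pvBStep (st : List Int × Int) (x : Int) : List Int × Int :=
  (st.1 ++ [st.2], if x = st.2 - 1 then 1 else 0)

def substract_one_binary_alt (binary : List Int) : List Int :=
  let st := binary.reverse.foldl pvBStep ([], 1)      -- for x in reversed(binary)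
  let cins := st.1.reverse                            -- cins.reverse()
  let result := (binary.zip cins).map (fun p => if p.1 = p.2 - 1 then 1 else p.1 - p.2)
  if st.2 ≠ 0 then PySem.List.slice result (some 1) none else result   -- result[1:] if c

-- ===== PRECONDITION & SPEC =====
def Spec_substract_one_binary (binary : List Int) (out : List Int) : Prop := out = substract_one_binary_alt binary
instance (binary : List Int) (out : List Int) : Decidable (Spec_substract_one_binary binary out) := by unfold Spec_substract_one_binary; infer_instance

-- ===== CLAIM (what is proved, stated in full; the proofs are below) =====
def Claim_equal_substract_one_binary : Prop := ∀ (binary : List Int), Dom_substract_one_binary binary → Spec_substract_one_binary binary (substract_one_binary binary)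

-- ===== LEMMAS AND PROOFS =====

-- reference recursions: the values and carries the borrow automaton produces
def pvVal : List Int → Int → List Int
  | [], _ => []
  | x :: t, c => (if x - c = -1 then 1 else x - c) :: pvVal t (if x - c = -1 then 1 else 0)

def pvCarry : List Int → Int → Int
  | [], c => c
  | x :: t, c => pvCarry t (if x - c = -1 then 1 else 0)

def pvCins : List Int → Int → List Int
  | [], _ => []
  | x :: t, c => c :: pvCins t (if x - c = -1 then 1 else 0)

theorem pvCins_length (l : List Int) (c : Int) : (pvCins l c).length = l.length := by
  induction l generalizing c with
  | nil => rfl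
  | cons x t ih => simp [pvCins, ih]

theorem pvA_fold (l : List Int) (c : Int) (acc : List Int) :
    List.foldl pvAStep (acc, c) l = (acc ++ pvVal l c, pvCarry l c) := by
  induction l generalizing c acc with
  | nil => simp [pvVal, pvCarry]
  | cons x t ih =>
    rw [List.foldl_cons]
    by_cases h : x - c = -1 <;> simp [pvAStep, h, ih, pvVal, pvCarry]

theorem pvB_fold (l : List Int) (c : Int) (acc : List Int) :
    List.foldl pvBStep (acc, c) l = (acc ++ pvCins l c, pvCarry l c) := by
  induction l generalizing c acc with
  | nil => simp [pvCins, pvCarry]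
  | cons x t ih =>
    rw [List.foldl_cons]
    have hcond : (if x = c - 1 then (1 : Int) else 0) = (if x - c = -1 then 1 else 0) := by
      split_ifs <;> omega
    by_cases h : x - c = -1 <;>
      simp [pvBStep, show (x = c - 1) ↔ (x - c = -1) by omega, h, ih, pvCins, pvCarry]

-- pass 2 of B recovers exactly the values the automaton wrote
theorem pvZipMap (l : List Int) (c : Int) :
    ((l.reverse.zip (pvCins l c).reverse).map
        (fun p => if p.1 = p.2 - 1 then (1 : Int) else p.1 - p.2))
      = (pvVal l c).reverse := by
  induction l generalizing c with
  | nil => simp [pvCins, pvVal]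
  | cons x t ih =>
    simp only [pvCins, pvVal, List.reverse_cons]
    rw [List.zip_append (by simp [pvCins_length]), List.map_append, ih]
    have : (if x = c - 1 then (1 : Int) else x - c) = (if x - c = -1 then 1 else x - c) := by
      split_ifs <;> omega
    simp [this]

theorem pvCarry_bit (l : List Int) (c : Int) (hc : c = 0 ∨ c = 1) :
    pvCarry l c = 0 ∨ pvCarry l c = 1 := by
  induction l generalizing c with
  | nil => simpa [pvCarry] using hc
  | cons x t ih =>
    rw [pvCarry]
    exact ih _ (by split_ifs <;> simp)

-- ===== VERDICT (by name: the statement is the Claim_ definition above) =====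
theorem substract_one_binary_spec : Claim_equal_substract_one_binary := by
  intro binary _hdom
  show substract_one_binary binary = substract_one_binary_alt binary
  unfold substract_one_binary substract_one_binary_alt
  rw [PySem.List.slice?_none_none_neg_one]
  simp only [Option.getD_some]
  rw [pvA_fold, pvB_fold]
  simp only [List.nil_append]
  have hz := pvZipMap binary.reverse 1
  rw [List.reverse_reverse] at hz
  rw [hz]
  rcases pvCarry_bit binary.reverse 1 (Or.inr rfl) with h0 | h1
  · rw [h0]
    simp only [if_neg (by omega : ¬ (0:Int) = 1), if_neg (by simp : ¬ (0:Int) ≠ 0)]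
    rw [PySem.List.slice?_none_none_neg_one]
    rfl
  · rw [h1]
    simp only [if_pos (by norm_num : (1 : Int) ≠ 0)]
    rw [PySem.List.slice_to_neg_one, PySem.List.slice_from_one,
        PySem.List.slice?_none_none_neg_one]
    simp [List.tail_reverse]
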